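-- pv_equiv track=rewrite | github.com/cgxeiji/strc_log | tools/parse_log.py | is_str_format
-- ===== SOURCE A (Python) =====
-- def is_str_format(text, idx):
--     found = 0
--     for i in range(len(text)):
--         if text[i] != "%":
--             continue
--         if i+1 >= len(text):
--             return False
--         if text[i+1] == "%":
--             continue
--         if text[i+1] == "s":
--             if found == idx:
--                 return True
--         found += 1
--     return False
-- ===== SOURCE B (Python) =====
-- def is_str_format(text, idx):
--     specs = [b for a, b in zip(text, text[1:]) if a == "%" and b != "%"]
--     return 0 <= idx < len(specs) and specs[idx] == "s"
-- ===== Notes on version B (the rewrite author's own statement) =====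
-- stated objective: simpler
-- what changed: Replaces A's position loop with in-loop specifier counter and three early-return branches by a single collect-then-index decomposition: build the list of characters following each counted '%' via zip(text, text[1:]) and test specs[idx] == 's' with a bounds guard.
import Mathlib
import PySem

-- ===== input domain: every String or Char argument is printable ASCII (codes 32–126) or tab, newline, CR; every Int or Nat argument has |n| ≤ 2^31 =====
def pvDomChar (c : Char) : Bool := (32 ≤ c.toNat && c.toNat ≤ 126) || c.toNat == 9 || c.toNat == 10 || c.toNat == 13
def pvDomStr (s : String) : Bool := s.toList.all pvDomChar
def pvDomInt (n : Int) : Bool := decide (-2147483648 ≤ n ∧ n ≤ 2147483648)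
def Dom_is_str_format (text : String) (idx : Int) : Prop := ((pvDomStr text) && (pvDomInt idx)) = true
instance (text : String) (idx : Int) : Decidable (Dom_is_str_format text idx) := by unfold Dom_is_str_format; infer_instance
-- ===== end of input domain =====

-- B replaces A's counting loop with early returns by collecting the character after each
-- counted '%' specifier once and indexing that list (objective: simpler/idiomatic).

-- ===== PORT A =====
-- A's for-loop over positions, transliterated as recursion over the suffix of the
-- character list: text[i] is the head, text[i+1] the head of the tail; branches in order.
def isStrLoopA (idx : Int) : List Char → Int → Bool
  | [], _ => false
  | c :: rest, found =>
    if c ≠ '%' then isStrLoopA idx rest found          -- continue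
    else
      match rest with
      | [] => false                                     -- i+1 >= len(text): return False
      | d :: _ =>
        if d = '%' then isStrLoopA idx rest found       -- continue
        else if d = 's' ∧ found = idx then true         -- return True
        else isStrLoopA idx rest (found + 1)            -- found += 1

def is_str_format (text : String) (idx : Int) : Bool :=
  isStrLoopA idx text.toList 0

-- ===== PORT B =====
-- zip(text, text[1:]) = zip of the char list with its tail (exact: [1:] drops the first char)
def is_str_format_alt (text : String) (idx : Int) : Bool :=
  let specs := ((text.toList.zip text.toList.tail).filter
      (fun p => p.1 = '%' && p.2 ≠ '%')).map Prod.snd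
  decide (0 ≤ idx) && decide (idx < specs.length) && (PySem.List.pyGet? specs idx == some 's')

-- ===== PRECONDITION & SPEC =====
def Spec_is_str_format (text : String) (idx : Int) (out : Bool) : Prop := out = is_str_format_alt text idx
instance (text : String) (idx : Int) (out : Bool) : Decidable (Spec_is_str_format text idx out) := by unfold Spec_is_str_format; infer_instance

-- ===== CLAIM (what is proved, stated in full; the proofs are below) =====
def Claim_equal_is_str_format : Prop := ∀ (text : String) (idx : Int), Dom_is_str_format text idx → Spec_is_str_format text idx (is_str_format text idx)

-- ===== LEMMAS AND PROOFS =====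

-- structural characterisation of B's specs list
def zfSpecs : List Char → List Char
  | c :: d :: rest => if c = '%' && d ≠ '%' then d :: zfSpecs (d :: rest) else zfSpecs (d :: rest)
  | _ => []

-- the boolean B computes from a specs list and an index
def bIdx (l : List Char) (j : Int) : Bool :=
  decide (0 ≤ j) && decide (j < l.length) && (PySem.List.pyGet? l j == some 's')

theorem zfSpecs_eq (cs : List Char) :
    ((cs.zip cs.tail).filter (fun p => p.1 = '%' && p.2 ≠ '%')).map Prod.snd = zfSpecs cs := by
  induction cs with
  | nil => simp [zfSpecs]
  | cons c rest ih =>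
    cases rest with
    | nil => simp [zfSpecs]
    | cons d r =>
      simp only [List.tail_cons, List.zip_cons_cons, List.filter_cons] at *
      by_cases h : c = '%' ∧ ¬d = '%'
      · rw [if_pos (show (decide (c = '%') && decide (d ≠ '%')) = true by simp [h.1, h.2]),
            List.map_cons, zfSpecs,
            if_pos (show (decide (c = '%') && decide (d ≠ '%')) = true by simp [h.1, h.2]), ih]
      · rw [if_neg (by simpa using h), zfSpecs, if_neg (by simpa using h), ih]

theorem bIdx_nil (j : Int) : bIdx [] j = false := by
  simp [bIdx]

theorem bIdx_cons (x : Char) (l : List Char) (j : Int) (h : ¬(j = 0 ∧ x = 's')) :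
    bIdx (x :: l) j = bIdx l (j - 1) := by
  by_cases h0 : j = 0
  · subst h0
    have hx : x ≠ 's' := fun hs => h ⟨rfl, hs⟩
    simp [bIdx, hx]
  · by_cases hneg : 0 ≤ j
    · have hpos : 0 < j := lt_of_le_of_ne hneg (Ne.symm h0)
      have h1 : PySem.List.pyGet? (x :: l) j = PySem.List.pyGet? l (j - 1) := by
        rw [PySem.List.pyGet?_of_nonneg _ (by omega),
            PySem.List.pyGet?_of_nonneg _ (by omega)]
        have ht : j.toNat = (j - 1).toNat + 1 := by omega
        rw [ht]
        simp
      have e1 : decide (0 ≤ j) = decide (0 ≤ j - 1) := decide_eq_decide.mpr (by omega)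
      have e2 : decide (j < (((x :: l).length : Nat) : Int))
          = decide ((j - 1) < ((l.length : Nat) : Int)) := by
        refine decide_eq_decide.mpr ?_
        simp only [List.length_cons]
        push_cast
        omega
      simp only [bIdx, h1, e1, e2]
    · have e1 : decide (0 ≤ j) = false := decide_eq_false hneg
      have e2 : decide (0 ≤ j - 1) = false := decide_eq_false (by omega)
      simp only [bIdx, e1, e2, Bool.false_and]

theorem loopA_not_pct (idx found : Int) (c : Char) (rest : List Char) (hc : ¬ c = '%') :
    isStrLoopA idx (c :: rest) found = isStrLoopA idx rest found := by
  rw [isStrLoopA.eq_def]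
  simp [hc]

theorem zfSpecs_not_pct (c : Char) (rest : List Char) (hc : ¬ c = '%') :
    zfSpecs (c :: rest) = zfSpecs rest := by
  cases rest with
  | nil => rfl
  | cons d r => rw [zfSpecs, if_neg (by simp [hc])]

theorem loopA_pct_cons (idx found : Int) (d : Char) (r : List Char) (hd : ¬ d = '%') :
    isStrLoopA idx ('%' :: d :: r) found
      = (if d = 's' ∧ found = idx then true else isStrLoopA idx (d :: r) (found + 1)) := by
  rw [isStrLoopA.eq_def]
  by_cases hs : d = 's' ∧ found = idx
  · simp [hs.1, hs.2]
  · simp [hd, hs]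

theorem loopA_eq (idx : Int) (cs : List Char) :
    ∀ found : Int, isStrLoopA idx cs found = bIdx (zfSpecs cs) (idx - found) := by
  induction cs with
  | nil => intro found; simp [isStrLoopA, zfSpecs, bIdx_nil]
  | cons c rest ih =>
    intro found
    by_cases hc : c = '%'
    · subst hc
      cases rest with
      | nil => simp [isStrLoopA, zfSpecs, bIdx_nil]
      | cons d r =>
        by_cases hd : d = '%'
        · subst hd
          have hstep : isStrLoopA idx ('%' :: '%' :: r) found
              = isStrLoopA idx ('%' :: r) found := by
            rw [isStrLoopA.eq_def]; simp
          have hzf : zfSpecs ('%' :: '%' :: r) = zfSpecs ('%' :: r) := by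
            rw [zfSpecs]; simp
          rw [hstep, hzf, ih]
        · rw [loopA_pct_cons _ _ _ _ hd,
              zfSpecs,
              if_pos (show (decide ('%' = '%') && decide (d ≠ '%')) = true by simp [hd])]
          by_cases hs : d = 's' ∧ found = idx
          · rw [if_pos hs]
            obtain ⟨hs1, hs2⟩ := hs
            subst hs1; subst hs2
            simp [bIdx]
          · rw [if_neg hs, ih,
                bIdx_cons d _ (idx - found) (by
                  rintro ⟨h1, h2⟩
                  exact hs ⟨h2, by omega⟩)]
            congr 1
            omega
    · rw [loopA_not_pct _ _ _ _ hc, zfSpecs_not_pct _ _ hc, ih]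

-- ===== VERDICT (by name: the statement is the Claim_ definition above) =====
theorem is_str_format_spec : Claim_equal_is_str_format := by
  intro text idx _
  unfold Spec_is_str_format is_str_format is_str_format_alt
  rw [loopA_eq, zfSpecs_eq]
  congr 1
  omega
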